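-- pv_equiv track=rewrite | github.com/qjwhnry/mo-stock-selection | src/mo_stock/filters/short/theme_filter.py | _bonus_from_table
-- ===== SOURCE A (Python) =====
-- def _bonus_from_table(table: dict[int, int], rank: int) -> int:
--     """从分档表查 rank 对应分数。table 形如 {1: 50, 2: 42, 3: 35, 5: 22, 10: 12}。
--
--     策略：找 >= rank 的最小 key 对应的分数（而非精确等于）。
--     rank=4 时若表里只有 1/2/3/5，返回 5 对应分数（保守）。
--     rank=0 或 rank > max(keys) → 0。
--     """
--     if rank <= 0 or not table:
--         return 0
--     sorted_keys = sorted(table.keys())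
--     max_key = sorted_keys[-1]
--     if rank > max_key:
--         return 0
--     for k in sorted_keys:
--         if k >= rank:
--             return table[k]
--     return 0
-- ===== SOURCE B (Python) =====
-- def _bonus_from_table(table: dict[int, int], rank: int) -> int:
--     if rank <= 0 or not table:
--         return 0
--     candidates = [k for k in table if k >= rank]
--     if not candidates:
--         return 0
--     return table[min(candidates)]
-- ===== Notes on version B (the rewrite author's own statement) =====
-- stated objective: faster
-- what changed: Replaces the sort + last-element max check + early-return linear scan with a single filter over the keys and min() of the surviving candidates; the rank > max(keys) case falls out as the empty candidate list.
import Mathlib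
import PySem

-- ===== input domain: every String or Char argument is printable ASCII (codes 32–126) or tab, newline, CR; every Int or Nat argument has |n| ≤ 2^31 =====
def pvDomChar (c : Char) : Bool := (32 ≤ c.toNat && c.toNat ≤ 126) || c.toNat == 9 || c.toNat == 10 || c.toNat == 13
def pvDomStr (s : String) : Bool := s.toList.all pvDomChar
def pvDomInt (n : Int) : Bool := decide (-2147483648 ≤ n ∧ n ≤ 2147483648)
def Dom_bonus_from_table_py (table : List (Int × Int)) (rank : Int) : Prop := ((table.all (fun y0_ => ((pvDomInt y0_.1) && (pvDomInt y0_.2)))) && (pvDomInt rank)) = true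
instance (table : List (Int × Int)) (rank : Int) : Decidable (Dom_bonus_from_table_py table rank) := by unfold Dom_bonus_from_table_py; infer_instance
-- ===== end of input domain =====

-- B replaces A's sort + max-key check + early-return scan by one filter over the keys and min()
-- of the candidates (objective: simpler).

-- ===== PORT A =====
-- the 'for k in sorted_keys: if k >= rank: return table[k]' loop (falls off the end with 0)
def bonusScanA (d : PySem.Dict Int Int) (rank : Int) : List Int → Int
  | [] => 0
  | k :: ks => if rank ≤ k then d.getD k 0 else bonusScanA d rank ks

def bonus_from_table_py (table : List (Int × Int)) (rank : Int) : Int :=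
  let d : PySem.Dict Int Int := PySem.Dict.ofList table
  if rank ≤ 0 ∨ table = [] then 0
  else
    let sorted_keys := PySem.List.sorted d.keys (fun k => k) false
    match PySem.List.pyGet? sorted_keys (-1) with
    | none => 0   -- unreachable: the guard ensures the table (hence the key list) is nonempty
    | some max_key =>
      if max_key < rank then 0
      else bonusScanA d rank sorted_keys

-- ===== PORT B =====
def bonus_from_table_py_alt (table : List (Int × Int)) (rank : Int) : Int :=
  let d : PySem.Dict Int Int := PySem.Dict.ofList table
  if rank ≤ 0 ∨ table = [] then 0
  else
    let candidates := d.keys.filter (fun k => decide (rank ≤ k))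
    match PySem.List.min? candidates (fun k => k) with
    | none => 0                     -- 'if not candidates: return 0'
    | some m => d.getD m 0          -- 'return table[min(candidates)]'

-- ===== PRECONDITION & SPEC =====
def Spec_bonus_from_table_py (table : List (Int × Int)) (rank : Int) (out : Int) : Prop := out = bonus_from_table_py_alt table rank
instance (table : List (Int × Int)) (rank : Int) (out : Int) : Decidable (Spec_bonus_from_table_py table rank out) := by unfold Spec_bonus_from_table_py; infer_instance

-- ===== CLAIM (what is proved, stated in full; the proofs are below) =====
def Claim_equal_bonus_from_table_py : Prop := ∀ (table : List (Int × Int)) (rank : Int), Dom_bonus_from_table_py table rank → Spec_bonus_from_table_py table rank (bonus_from_table_py table rank)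

-- ===== LEMMAS AND PROOFS =====

-- A's early-return scan returns the head of the filtered list
theorem bonusScanA_eq_filter (d : PySem.Dict Int Int) (rank : Int) (s : List Int) :
    bonusScanA d rank s =
      match s.filter (fun k => decide (rank ≤ k)) with
      | [] => 0
      | h :: _ => d.getD h 0 := by
  induction s with
  | nil => rfl
  | cons k ks ih =>
    by_cases h : rank ≤ k
    · simp [bonusScanA, h]
    · simp [bonusScanA, h, ih]

-- in a ≤-sorted list every element is at most the last
theorem le_getLast_of_pairwise (s : List Int) (h : s.Pairwise (· ≤ ·)) (hne : s ≠ []) :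
    ∀ x ∈ s, x ≤ s.getLast hne := by
  induction s with
  | nil => simp
  | cons a t ih =>
    intro x hx
    cases t with
    | nil => simp at hx; simp [hx, List.getLast]
    | cons b u =>
      rw [List.getLast_cons (by simp)]
      rcases List.mem_cons.mp hx with rfl | hx'
      · have hab : x ≤ b := (List.pairwise_cons.mp h).1 b (by simp)
        exact le_trans hab (ih (List.pairwise_cons.mp h).2 (by simp) b (by simp))
      · exact ih (List.pairwise_cons.mp h).2 (by simp) x hx'

theorem keys_ofList_eq (l : List (Int × Int)) :
    (PySem.Dict.ofList l).keys = PySem.Set.ofList (l.map Prod.fst) := by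
  have := PySem.Dict.keys_foldl_insert_key l Prod.fst (fun d p => p.2) PySem.Dict.empty
  simpa [PySem.Dict.ofList, PySem.Dict.keys_empty] using this

theorem keys_ofList_ne_nil (l : List (Int × Int)) (h : l ≠ []) :
    (PySem.Dict.ofList l).keys ≠ [] := by
  rw [keys_ofList_eq]
  cases l with
  | nil => exact absurd rfl h
  | cons p t => simp [PySem.Set.ofList_cons]

theorem bonus_from_table_py_spec : Claim_equal_bonus_from_table_py := by
  intro table rank _
  show bonus_from_table_py table rank = bonus_from_table_py_alt table rank
  unfold bonus_from_table_py bonus_from_table_py_alt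
  by_cases hg : rank ≤ 0 ∨ table = []
  · simp [hg]
  · simp only [hg, if_false]
    have htab : table ≠ [] := fun h => hg (Or.inr h)
    set d : PySem.Dict Int Int := PySem.Dict.ofList table with hd
    set s : List Int := PySem.List.sorted d.keys (fun k => k) false with hs
    have hperm : s.Perm d.keys := PySem.List.sorted_perm d.keys (fun k => k) false
    have hpw : s.Pairwise (· ≤ ·) := by
      have := PySem.List.sorted_pairwise d.keys (fun k => k); simpa [← hs] using this
    have hne : s ≠ [] := by
      intro h0
      rw [hs, PySem.List.sorted_eq_nil_iff] at h0
      exact keys_ofList_ne_nil table htab h0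
    have hget : PySem.List.pyGet? s (-1) = some (s.getLast hne) := by
      rw [PySem.List.pyGet?_neg_one, List.getLast?_eq_some_getLast]
    rw [hget]
    dsimp only
    have hfperm : (s.filter (fun k => decide (rank ≤ k))).Perm
        (d.keys.filter (fun k => decide (rank ≤ k))) := hperm.filter _
    rw [bonusScanA_eq_filter]
    by_cases hcn : d.keys.filter (fun k => decide (rank ≤ k)) = []
    · have hsf : s.filter (fun k => decide (rank ≤ k)) = [] := by
        have h2 := hfperm; rw [hcn] at h2; exact h2.eq_nil
      rw [hsf, hcn]
      dsimp only
      split <;> rfl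
    · cases hm : PySem.List.min? (d.keys.filter (fun k => decide (rank ≤ k))) (fun k => k) with
      | none => exact absurd ((PySem.List.min?_eq_none_iff _ _).mp hm) hcn
      | some m =>
        have hmmem : m ∈ d.keys.filter (fun k => decide (rank ≤ k)) := PySem.List.min?_mem hm
        have hmmin : ∀ y ∈ d.keys.filter (fun k => decide (rank ≤ k)), m ≤ y := by
          have := PySem.List.min?_isMin hm; simpa using this
        have hsfne : s.filter (fun k => decide (rank ≤ k)) ≠ [] := by
          intro h0
          have h2 := hfperm; rw [h0] at h2
          exact hcn h2.symm.eq_nil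
        cases hsf : s.filter (fun k => decide (rank ≤ k)) with
        | nil => exact absurd hsf hsfne
        | cons h t =>
          have hhmem : h ∈ s.filter (fun k => decide (rank ≤ k)) := by rw [hsf]; simp
          have hmmem' : m ∈ s.filter (fun k => decide (rank ≤ k)) := hfperm.mem_iff.mpr hmmem
          have hhc : h ∈ d.keys.filter (fun k => decide (rank ≤ k)) := hfperm.mem_iff.mp hhmem
          have hfpw : (s.filter (fun k => decide (rank ≤ k))).Pairwise (· ≤ ·) := hpw.filter _
          have hhle : ∀ y ∈ s.filter (fun k => decide (rank ≤ k)), h ≤ y := by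
            rw [hsf] at hfpw ⊢
            intro y hy
            rcases List.mem_cons.mp hy with rfl | hy'
            · exact le_refl y
            · exact (List.pairwise_cons.mp hfpw).1 y hy'
          have hhm : h = m := le_antisymm (hhle m hmmem') (hmmin h hhc)
          have hrm : rank ≤ m := by
            have := List.of_mem_filter hmmem; simpa using this
          have hms : m ∈ s := List.mem_of_mem_filter hmmem'
          have hmax : ¬ (s.getLast hne < rank) := by
            have := le_getLast_of_pairwise s hpw hne m hms
            omega
          rw [if_neg hmax]
          dsimp only
          rw [hhm]
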